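-- pv_equiv track=rewrite | github.com/SiyuanSong2004/chinese-babylm-eval-pipeline | evaluation_pipeline/cogbench/eye_tracking/model/run_chinese.py | _map_words_to_tokens
-- ===== SOURCE A (Python) =====
-- def _map_words_to_tokens(offsets: list[tuple[int, int]], spans: list[tuple[int, int]]) -> list[list[int]]:
--     token_indices = []
--     for ws, we in spans:
--         hits = []
--         for tok_i, (ts, te) in enumerate(offsets):
--             if te <= ts:
--                 continue
--             if ts < we and te > ws:
--                 hits.append(tok_i)
--         token_indices.append(hits)
--     return token_indices
-- ===== SOURCE B (Python) =====
-- def _map_words_to_tokens(offsets: list[tuple[int, int]], spans: list[tuple[int, int]]) -> list[list[int]]: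
--     # Index once: keep only valid tokens, sorted by start offset; per span a
--     # binary search finds the prefix of tokens with ts < we, which is then
--     # filtered by te > ws and the indices re-sorted into ascending order.
--     toks = sorted(((ts, te, i) for i, (ts, te) in enumerate(offsets) if te > ts),
--                   key=lambda t: t[0])
--     n = len(toks)
--     res = []
--     for ws, we in spans:
--         lo, hi = 0, n
--         while lo < hi:
--             mid = (lo + hi) // 2
--             if toks[mid][0] < we:
--                 lo = mid + 1
--             else:
--                 hi = mid
--         res.append(sorted(i for _, te, i in toks[:lo] if te > ws))
--     return res
-- ===== Notes on version B (the rewrite author's own statement) =====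
-- stated objective: alternative
-- what changed: B pre-filters the valid tokens into a list sorted by start offset, binary-searches per span for the prefix of tokens starting before the span's end, and filters only that prefix (re-sorting the hit indices), instead of rescanning every token for every span.
import Mathlib
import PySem

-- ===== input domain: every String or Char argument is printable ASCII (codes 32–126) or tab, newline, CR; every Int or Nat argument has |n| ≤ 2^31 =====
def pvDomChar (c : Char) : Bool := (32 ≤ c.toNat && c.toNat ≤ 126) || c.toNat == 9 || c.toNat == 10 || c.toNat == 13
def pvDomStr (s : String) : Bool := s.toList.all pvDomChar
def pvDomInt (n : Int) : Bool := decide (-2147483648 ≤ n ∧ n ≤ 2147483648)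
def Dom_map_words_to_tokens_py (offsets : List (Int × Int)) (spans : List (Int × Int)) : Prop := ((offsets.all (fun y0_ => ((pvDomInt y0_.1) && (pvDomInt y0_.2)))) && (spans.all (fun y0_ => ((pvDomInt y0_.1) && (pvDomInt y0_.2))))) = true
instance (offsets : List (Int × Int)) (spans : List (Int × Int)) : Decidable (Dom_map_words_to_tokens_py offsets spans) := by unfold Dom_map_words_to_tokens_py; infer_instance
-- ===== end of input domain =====

-- B replaces A's per-span scan of all tokens by a start-sorted index of the valid tokens
-- plus a per-span binary search for the prefix starting before the span's end (objective: alternative).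

-- ===== PORT A =====
def map_words_to_tokens_py (offsets : List (Int × Int)) (spans : List (Int × Int)) : List (List Int) :=
  spans.foldl
    (fun token_indices p =>
      token_indices ++
        [(PySem.List.enumerate offsets).foldl
          (fun hits q =>
            if q.2.2 ≤ q.2.1 then hits
            else if q.2.1 < p.2 ∧ q.2.2 > p.1 then hits ++ [q.1] else hits)
          []])
    []

-- ===== PORT B =====
-- the hand-written 'while lo < hi' binary search of Source B, step for step
def pvBsearch (toks : List (Int × Int × Int)) (we : Int) (lo hi : Int) : Int :=
  if h : lo < hi then
    let mid := PySem.Int.floordiv (lo + hi) 2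
    if (PySem.List.pyGetD toks mid (0, 0, 0)).1 < we then
      pvBsearch toks we (mid + 1) hi
    else
      pvBsearch toks we lo mid
  else lo
termination_by (hi - lo).toNat
decreasing_by
  · have h1 := (PySem.Int.le_floordiv_iff_mul_le (a := lo + hi) (b := 2) (q := lo) (by omega)).mpr (by omega)
    omega
  · have h2 := (PySem.Int.floordiv_lt_iff_lt_mul (a := lo + hi) (b := 2) (q := hi) (by omega)).mpr (by omega)
    omega

def map_words_to_tokens_py_alt (offsets : List (Int × Int)) (spans : List (Int × Int)) : List (List Int) :=
  let toks := PySem.List.sorted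
      (((PySem.List.enumerate offsets).filter (fun q => decide (q.2.2 > q.2.1))).map
        (fun q => (q.2.1, q.2.2, q.1)))
      (fun t => t.1) false
  let n : Int := toks.length
  spans.foldl
    (fun res p =>
      let lo := pvBsearch toks p.2 0 n
      res ++ [PySem.List.sorted
        (((PySem.List.slice toks none (some lo)).filter (fun t => decide (t.2.1 > p.1))).map
          (fun t => t.2.2))
        (fun x => x) false])
    []

-- ===== PRECONDITION & SPEC =====
def Spec_map_words_to_tokens_py (offsets : List (Int × Int)) (spans : List (Int × Int)) (out : List (List Int)) : Prop := out = map_words_to_tokens_py_alt offsets spans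
instance (offsets : List (Int × Int)) (spans : List (Int × Int)) (out : List (List Int)) : Decidable (Spec_map_words_to_tokens_py offsets spans out) := by unfold Spec_map_words_to_tokens_py; infer_instance

-- ===== CLAIM (what is proved, stated in full; the proofs are below) =====
def Claim_equal_map_words_to_tokens_py : Prop := ∀ (offsets : List (Int × Int)) (spans : List (Int × Int)), Dom_map_words_to_tokens_py offsets spans → Spec_map_words_to_tokens_py offsets spans (map_words_to_tokens_py offsets spans)

-- ===== LEMMAS AND PROOFS =====

-- A's inner loop collects, in index order, the valid tokens overlapping the span.
theorem pv_innerA_eq (offsets : List (Int × Int)) (p : Int × Int) :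
    (PySem.List.enumerate offsets).foldl
      (fun hits q =>
        if q.2.2 ≤ q.2.1 then hits
        else if q.2.1 < p.2 ∧ q.2.2 > p.1 then hits ++ [q.1] else hits)
      []
    = ((PySem.List.enumerate offsets).filter
        (fun q => decide (q.2.1 < q.2.2) && decide (q.2.1 < p.2) && decide (p.1 < q.2.2))).map (·.1) := by
  have hstep : (fun (hits : List Int) (q : Int × Int × Int) =>
        if q.2.2 ≤ q.2.1 then hits
        else if q.2.1 < p.2 ∧ q.2.2 > p.1 then hits ++ [q.1] else hits)
      = (fun hits q =>
        if (decide (q.2.1 < q.2.2) && decide (q.2.1 < p.2) && decide (p.1 < q.2.2)) = true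
        then hits ++ [q.1] else hits) := by
    funext hits q
    by_cases h1 : q.2.2 ≤ q.2.1
    · rw [if_pos h1, if_neg (by simp only [Bool.and_eq_true, decide_eq_true_eq]; rintro ⟨⟨ha, _⟩, _⟩; omega)]
    · by_cases h2 : q.2.1 < p.2 ∧ q.2.2 > p.1
      · rw [if_neg h1, if_pos h2, if_pos (by simp only [Bool.and_eq_true, decide_eq_true_eq]; exact ⟨⟨by omega, h2.1⟩, h2.2⟩)]
      · rw [if_neg h1, if_neg h2, if_neg (by simp only [Bool.and_eq_true, decide_eq_true_eq]; rintro ⟨⟨_, hb⟩, hc⟩; exact h2 ⟨hb, hc⟩)]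
  rw [hstep, PySem.List.foldl_append_if]
  simp

-- The binary search of Source B: given a start-monotone token list and a correct bracket,
-- it returns the exact boundary of the prefix of tokens with start < we.
theorem pvBsearch_spec (toks : List (Int × Int × Int)) (we lo hi : Int)
    (hmono : toks.Pairwise (fun a b => a.1 ≤ b.1))
    (h0 : 0 ≤ lo) (hlh : lo ≤ hi) (hhn : hi ≤ (toks.length : Int))
    (hlow : ∀ k : Nat, k < lo.toNat → (hk : k < toks.length) → toks[k].1 < we)
    (hhigh : ∀ k : Nat, hi.toNat ≤ k → (hk : k < toks.length) → we ≤ toks[k].1) :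
    0 ≤ pvBsearch toks we lo hi ∧ pvBsearch toks we lo hi ≤ (toks.length : Int) ∧
    (∀ k : Nat, (hk : k < toks.length) → (toks[k].1 < we ↔ k < (pvBsearch toks we lo hi).toNat)) := by
  fun_induction pvBsearch toks we lo hi with
  | case1 lo hi h mid hmid ih =>
    have hmb1 := (PySem.Int.le_floordiv_iff_mul_le (a := lo + hi) (b := 2) (q := lo) (by omega)).mpr (by omega)
    have hmb2 := (PySem.Int.floordiv_lt_iff_lt_mul (a := lo + hi) (b := 2) (q := hi) (by omega)).mpr (by omega)
    have hmono' := (List.pairwise_iff_getElem).mp hmono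
    have hmlen : mid.toNat < toks.length := by omega
    have hget : PySem.List.pyGetD toks mid (0, 0, 0) = toks[mid.toNat] :=
      PySem.List.pyGetD_eq_getElem toks (0, 0, 0) (by omega) (by omega)
    apply ih (by omega) (by omega) (by omega)
    · intro k hk hklen
      rcases lt_or_ge k lo.toNat with hkl | hkl
      · exact hlow k hkl hklen
      · have : toks[k].1 ≤ toks[mid.toNat].1 := by
          rcases eq_or_lt_of_le (show k ≤ mid.toNat by omega) with heq | hlt
          · subst heq; exact le_refl _
          · exact hmono' k mid.toNat hklen hmlen hlt
        rw [hget] at hmid; omega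
    · exact hhigh
  | case2 lo hi h mid hmid ih =>
    have hmb1 := (PySem.Int.le_floordiv_iff_mul_le (a := lo + hi) (b := 2) (q := lo) (by omega)).mpr (by omega)
    have hmb2 := (PySem.Int.floordiv_lt_iff_lt_mul (a := lo + hi) (b := 2) (q := hi) (by omega)).mpr (by omega)
    have hmono' := (List.pairwise_iff_getElem).mp hmono
    have hmlen : mid.toNat < toks.length := by omega
    have hget : PySem.List.pyGetD toks mid (0, 0, 0) = toks[mid.toNat] :=
      PySem.List.pyGetD_eq_getElem toks (0, 0, 0) (by omega) (by omega)
    apply ih (by omega) (by omega) (by omega)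
    · exact hlow
    · intro k hk hklen
      have : toks[mid.toNat].1 ≤ toks[k].1 := by
        rcases eq_or_lt_of_le (show mid.toNat ≤ k by omega) with heq | hlt
        · subst heq; exact le_rfl
        · exact hmono' mid.toNat k hmlen hklen hlt
      rw [hget] at hmid; omega
  | case3 lo hi h =>
    refine ⟨by omega, by omega, ?_⟩
    intro k hk
    constructor
    · intro hlt
      by_contra hge
      exact absurd (hhigh k (by omega) hk) (by omega)
    · intro hklo
      exact hlow k (by omega) hk

-- a prefix on which a predicate holds exactly is that predicate's filter
theorem pv_filter_eq_take {α : Type} (P : α → Bool) (xs : List α) (r : Nat) (hr : r ≤ xs.length)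
    (h : ∀ k : Nat, (hk : k < xs.length) → (P xs[k] = true ↔ k < r)) :
    xs.filter P = xs.take r := by
  induction xs generalizing r with
  | nil => simp
  | cons x xs ih =>
    cases r with
    | zero =>
      simp only [List.take_zero]
      rw [List.filter_eq_nil_iff]
      intro a ha
      rcases List.mem_iff_getElem.mp (List.mem_cons_self (a := x) (l := xs) |> fun _ => ha) with ⟨k, hk, hak⟩
      subst hak
      intro hP
      exact absurd ((h k hk).mp hP) (by omega)
    | succ r =>
      have hx : P x = true := (h 0 (by simp)).mpr (by omega)
      simp only [List.take_succ_cons, List.filter_cons, hx, if_pos]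
      rw [ih r (by simpa using hr) (fun k hk => by simpa using h (k + 1) (by simpa using Nat.succ_lt_succ hk))]

-- the per-span value B computes equals the per-span value A computes
theorem pv_inner_eq (offsets : List (Int × Int)) (p : Int × Int) :
    PySem.List.sorted
      (((PySem.List.slice
            (PySem.List.sorted
              (((PySem.List.enumerate offsets).filter (fun q => decide (q.2.2 > q.2.1))).map
                (fun q => (q.2.1, q.2.2, q.1)))
              (fun t => t.1) false)
          none
          (some (pvBsearch
            (PySem.List.sorted
              (((PySem.List.enumerate offsets).filter (fun q => decide (q.2.2 > q.2.1))).map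
                (fun q => (q.2.1, q.2.2, q.1)))
              (fun t => t.1) false)
            p.2 0
            ((PySem.List.sorted
              (((PySem.List.enumerate offsets).filter (fun q => decide (q.2.2 > q.2.1))).map
                (fun q => (q.2.1, q.2.2, q.1)))
              (fun t => t.1) false).length : Int)))).filter
          (fun t => decide (t.2.1 > p.1))).map (fun t => t.2.2))
      (fun x => x) false
    = ((PySem.List.enumerate offsets).filter
        (fun q => decide (q.2.1 < q.2.2) && decide (q.2.1 < p.2) && decide (p.1 < q.2.2))).map (·.1) := by
  set T0 := ((PySem.List.enumerate offsets).filter (fun q => decide (q.2.2 > q.2.1))).map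
    (fun q => (q.2.1, q.2.2, q.1)) with hT0
  set toks := PySem.List.sorted T0 (fun t => t.1) false with htoks
  have hmono : toks.Pairwise (fun a b => a.1 ≤ b.1) := PySem.List.sorted_pairwise T0 (fun t => t.1)
  obtain ⟨hr0, hrn, hriff⟩ := pvBsearch_spec toks p.2 0 (toks.length : Int) hmono
    (by omega) (by omega) (by omega)
    (by intro k hk _; omega)
    (by intro k hk hklen; omega)
  set r := pvBsearch toks p.2 0 (toks.length : Int) with hrdef
  rw [PySem.List.slice_to toks hr0]
  rw [← pv_filter_eq_take (fun t => decide (t.1 < p.2)) toks r.toNat (by omega)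
        (fun k hk => by simpa using hriff k hk)]
  rw [List.filter_filter]
  -- the candidate list is a permutation of A's (index-ascending) hit list
  have hperm : ((toks.filter (fun t => decide (t.2.1 > p.1) && decide (t.1 < p.2))).map (fun t => t.2.2)).Perm
      (((PySem.List.enumerate offsets).filter
        (fun q => decide (q.2.1 < q.2.2) && decide (q.2.1 < p.2) && decide (p.1 < q.2.2))).map (·.1)) := by
    have hp0 : toks.Perm T0 := PySem.List.sorted_perm T0 (fun t => t.1) false
    have h1 : (toks.filter (fun t => decide (t.2.1 > p.1) && decide (t.1 < p.2))).Perm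
        (T0.filter (fun t => decide (t.2.1 > p.1) && decide (t.1 < p.2))) := hp0.filter _
    refine (h1.map _).trans ?_
    rw [hT0, List.filter_map, List.map_map, List.filter_filter]
    apply List.Perm.of_eq
    apply congrArg
    apply List.filter_congr
    intro q _
    by_cases h1 : q.2.1 < q.2.2 <;> by_cases h2 : q.2.1 < p.2 <;> by_cases h3 : p.1 < q.2.2 <;>
      simp [h1, h2, h3]
  -- A's hit list is strictly increasing in the token index
  have hpair : (((PySem.List.enumerate offsets).filter
      (fun q => decide (q.2.1 < q.2.2) && decide (q.2.1 < p.2) && decide (p.1 < q.2.2))).map (·.1)).Pairwise (· < ·) := by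
    rw [List.pairwise_map]
    exact (PySem.List.pairwise_lt_enumerate offsets 0).filter _
  exact PySem.List.sorted_eq_of_perm_of_pairwise_lt _ _ _ hperm.symm hpair

-- ===== VERDICT (by name: the statement is the Claim_ definition above) =====
theorem map_words_to_tokens_py_spec : Claim_equal_map_words_to_tokens_py := by
  intro offsets spans _
  unfold Spec_map_words_to_tokens_py map_words_to_tokens_py map_words_to_tokens_py_alt
  rw [PySem.List.foldl_append_singleton_eq_map, PySem.List.foldl_append_singleton_eq_map]
  simp only [List.nil_append]
  apply List.map_congr_left
  intro p _
  rw [pv_innerA_eq, pv_inner_eq]
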